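-- pv_equiv track=rewrite | github.com/spencerthomas/pack | libs/cli/deepagents_cli/harness_check.py | _tail_summary
-- ===== SOURCE A (Python) =====
-- def _tail_summary(text: str) -> str:
--     if not text:
--         return ""
--     last_line = ""
--     for line in text.splitlines():
--         if line.strip():
--             last_line = line.strip()
--     return last_line
-- ===== SOURCE B (Python) =====
-- def _tail_summary(text: str) -> str:
--     for line in reversed(text.splitlines()):
--         s = line.strip()
--         if s:
--             return s
--     return ""
-- ===== Notes on version B (the rewrite author's own statement) =====
-- stated objective: simpler
-- what changed: B scans the lines from the end and returns the first non-blank stripped line immediately (early exit), instead of A's full forward pass that keeps overwriting an accumulator; the empty-text guard is dropped since it falls out naturally.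
import Mathlib
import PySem

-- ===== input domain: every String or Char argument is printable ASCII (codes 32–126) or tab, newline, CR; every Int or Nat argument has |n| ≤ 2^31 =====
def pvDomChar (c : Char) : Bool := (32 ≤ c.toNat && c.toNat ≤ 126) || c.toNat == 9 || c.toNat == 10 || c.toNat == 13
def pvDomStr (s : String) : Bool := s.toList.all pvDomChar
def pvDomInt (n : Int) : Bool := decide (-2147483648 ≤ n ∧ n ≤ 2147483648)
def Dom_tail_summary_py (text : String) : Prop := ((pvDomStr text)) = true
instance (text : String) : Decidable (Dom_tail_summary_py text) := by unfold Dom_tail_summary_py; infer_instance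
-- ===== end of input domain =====

-- ===== PORT A =====
-- header: B scans lines from the end with early exit instead of A's forward overwrite pass (simpler decomposition); equal return values on all inputs.
def tail_summary_py (text : String) : String :=
  if text = "" then ""
  else
    (PySem.Str.splitlines text).foldl
      (fun last_line line =>
        if PySem.Str.strip line ≠ "" then PySem.Str.strip line else last_line) ""

-- ===== PORT B =====
def pvTailFind : List String → String
  | [] => ""
  | line :: rest =>
    let s := PySem.Str.strip line
    if s ≠ "" then s else pvTailFind rest

def tail_summary_py_alt (text : String) : String :=
  pvTailFind (PySem.Str.splitlines text).reverse

-- ===== PRECONDITION & SPEC =====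
def Spec_tail_summary_py (text : String) (out : String) : Prop := out = tail_summary_py_alt text
instance (text : String) (out : String) : Decidable (Spec_tail_summary_py text out) := by unfold Spec_tail_summary_py; infer_instance

-- ===== CLAIM (what is proved, stated in full; the proofs are below) =====
def Claim_equal_tail_summary_py : Prop := ∀ (text : String), Dom_tail_summary_py text → Spec_tail_summary_py text (tail_summary_py text)

-- ===== LEMMAS AND PROOFS =====

-- ===== VERDICT (by name: the statement is the Claim_ definition above) =====
theorem pv_fold_eq_find (ls : List String) :
    ls.foldl (fun last_line line =>
        if PySem.Str.strip line ≠ "" then PySem.Str.strip line else last_line) ""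
      = pvTailFind ls.reverse := by
  induction ls using List.reverseRecOn with
  | nil => rfl
  | append_singleton xs x ih =>
    rw [List.foldl_append, List.reverse_append]
    simp only [List.foldl_cons, List.foldl_nil, List.reverse_cons, List.reverse_nil,
      List.nil_append, List.singleton_append, pvTailFind]
    split_ifs with h
    · rfl
    · exact ih

theorem tail_summary_py_spec : Claim_equal_tail_summary_py := by
  intro text _
  unfold Spec_tail_summary_py tail_summary_py tail_summary_py_alt
  by_cases h : text = ""
  · subst h; rfl
  · simp only [h, if_false, pv_fold_eq_find]
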